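-- pv_equiv track=rewrite | github.com/stacs-cp/permutation-classes-cp | tests/vincular_test.py | check_contain_pattern
-- ===== SOURCE A (Python) =====
-- import itertools
--
-- def check_contain_pattern(pattern_pairs, permutation_pairs, permutation, adjacent):
--     patt_pairs = list(itertools.combinations(pattern_pairs, 2))
--     perm_pairs = list(itertools.combinations(permutation_pairs, 2))
--     patt_list = []
--     perm_list = []
--     for i in range(len(patt_pairs)):
--         patt_list.append(patt_pairs[i][0] < patt_pairs[i][1])
--
--     for i in range(len(perm_pairs)):
--         perm_list.append(perm_pairs[i][0] < perm_pairs[i][1])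
--
--     return perm_list == patt_list and check_vincular_property(perm_pairs, permutation, adjacent)
--
-- def check_vincular_property(perm_pairs, permutation, adjacent):
--     if adjacent == 1:
--         for item in perm_pairs:
--             if permutation.index(item[1]) - permutation.index(item[0]) == 1:
--                 return True
--         return False
--     elif adjacent == 2:
--         for item in perm_pairs:
--             if permutation.index(item[len(item) - 1]) - permutation.index(item[len(item) - 2]) == 1:
--                 return True
--         return False
-- ===== SOURCE B (Python) =====
-- def check_contain_pattern(pattern_pairs, permutation_pairs, permutation, adjacent):
--     m = len(pattern_pairs)
--     if len(permutation_pairs) != m: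
--         return False
--     if any((pattern_pairs[i] < pattern_pairs[j]) != (permutation_pairs[i] < permutation_pairs[j])
--            for i in range(m) for j in range(i + 1, m)):
--         return False
--     pos = {}
--     for i, v in enumerate(permutation):
--         pos.setdefault(v, i)
--     seen = set()
--     for y in permutation_pairs:
--         if pos[y] - 1 in seen:
--             return True
--         seen.add(pos[y])
--     return False
-- ===== Notes on version B (the rewrite author's own statement) =====
-- stated objective: faster
-- what changed: B compares the two pairwise-order patterns with a short-circuiting index scan instead of materialising two O(m^2) boolean lists from itertools.combinations, and decides the vincular property with a first-occurrence position dict plus a one-pass predecessor-set scan instead of calling permutation.index on every combination pair.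
-- outside the precondition, e.g. on check_contain_pattern([], [], [], 3): A returns None, B returns False; on check_contain_pattern([1], [2], [], 1): A returns False, B raises KeyError; on check_contain_pattern([1, 2, 3], [1, 2, 9], [1, 2], 1): A returns True, B returns True
import Mathlib
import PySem

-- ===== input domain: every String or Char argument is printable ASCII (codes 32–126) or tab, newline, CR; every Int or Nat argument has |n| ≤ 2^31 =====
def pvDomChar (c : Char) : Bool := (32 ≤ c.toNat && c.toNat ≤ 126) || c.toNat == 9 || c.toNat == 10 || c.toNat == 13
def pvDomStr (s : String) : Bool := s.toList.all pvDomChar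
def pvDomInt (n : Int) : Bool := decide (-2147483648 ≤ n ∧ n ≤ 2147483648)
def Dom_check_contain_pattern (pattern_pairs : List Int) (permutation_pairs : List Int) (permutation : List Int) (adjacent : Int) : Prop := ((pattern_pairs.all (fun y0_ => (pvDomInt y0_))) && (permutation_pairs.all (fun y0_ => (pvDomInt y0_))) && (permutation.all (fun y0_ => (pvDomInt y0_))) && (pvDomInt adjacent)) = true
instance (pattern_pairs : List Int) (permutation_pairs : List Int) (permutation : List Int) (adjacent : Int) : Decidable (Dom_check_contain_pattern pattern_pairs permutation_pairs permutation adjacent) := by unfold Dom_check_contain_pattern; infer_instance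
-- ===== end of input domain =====

-- B replaces A's two materialised O(m^2) boolean lists by a short-circuiting pairwise scan, and replaces the
-- vincular search (list.index over every pair) by a first-occurrence position dict plus a one-pass
-- predecessor-set scan.

-- ===== PORT A =====
-- patt_list/perm_list loops: for i in range(len(pairs)): list.append(pairs[i][0] < pairs[i][1])
def pvBools (pairs : List (List Int)) : List Bool :=
  (PySem.List.pyRange 0 (pairs.length : Int) 1).foldl
    (fun acc i =>
      (fun acc item => acc ++ [decide (PySem.List.pyGetD item 0 0 < PySem.List.pyGetD item 1 0)])
        acc (PySem.List.pyGetD pairs i []))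
    []

-- adjacent == 1 loop; the 'none' arm is where permutation.index raises ValueError (excluded by Pre_)
def pvVincLoop1 (permutation : List Int) : List (List Int) → Bool
  | [] => false
  | item :: rest =>
    match PySem.List.index? permutation (PySem.List.pyGetD item 1 0),
          PySem.List.index? permutation (PySem.List.pyGetD item 0 0) with
    | some a, some b => if (a : Int) - (b : Int) = 1 then true else pvVincLoop1 permutation rest
    | _, _ => false

-- adjacent == 2 loop (item[len(item)-1], item[len(item)-2])
def pvVincLoop2 (permutation : List Int) : List (List Int) → Bool
  | [] => false
  | item :: rest =>
    match PySem.List.index? permutation (PySem.List.pyGetD item ((item.length : Int) - 1) 0),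
          PySem.List.index? permutation (PySem.List.pyGetD item ((item.length : Int) - 2) 0) with
    | some a, some b => if (a : Int) - (b : Int) = 1 then true else pvVincLoop2 permutation rest
    | _, _ => false

-- Python returns None when adjacent is neither 1 nor 2; Pre_ excludes reaching that (false here)
def check_vincular_property (perm_pairs : List (List Int)) (permutation : List Int) (adjacent : Int) : Bool :=
  if adjacent = 1 then pvVincLoop1 permutation perm_pairs
  else if adjacent = 2 then pvVincLoop2 permutation perm_pairs
  else false

def check_contain_pattern (pattern_pairs : List Int) (permutation_pairs : List Int) (permutation : List Int) (adjacent : Int) : Bool :=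
  let patt_pairs := PySem.List.combinations pattern_pairs 2
  let perm_pairs := PySem.List.combinations permutation_pairs 2
  let patt_list := pvBools patt_pairs
  let perm_list := pvBools perm_pairs
  if perm_list = patt_list then check_vincular_property perm_pairs permutation adjacent else false

-- ===== PORT B =====
-- any((p[i] < p[j]) != (q[i] < q[j]) for i in range(m) for j in range(i+1, m))
def pvMismatch (p q : List Int) : Bool :=
  (List.range p.length).any fun i =>
    (List.range' (i + 1) (p.length - (i + 1))).any fun j =>
      decide (p.getD i 0 < p.getD j 0) != decide (q.getD i 0 < q.getD j 0)

-- pos = {}; for i, v in enumerate(permutation): pos.setdefault(v, i)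
def pvPos (permutation : List Int) : PySem.Dict Int Int :=
  (PySem.List.enumerate permutation 0).foldl (fun d iv => d.setdefault iv.2 iv.1) PySem.Dict.empty

-- seen = set(); for y in q: if pos[y] - 1 in seen: return True; seen.add(pos[y]); return False
-- (pos[y] raises KeyError when y is missing; Pre_ excludes that, so the getD default is never read)
def pvScan (pos : PySem.Dict Int Int) (seen : PySem.Set Int) : List Int → Bool
  | [] => false
  | y :: rest =>
    let py := pos.getD y 0
    if PySem.Set.contains seen (py - 1) then true
    else pvScan pos (PySem.Set.add seen py) rest

def check_contain_pattern_alt (pattern_pairs : List Int) (permutation_pairs : List Int) (permutation : List Int) (adjacent : Int) : Bool :=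
  if permutation_pairs.length ≠ pattern_pairs.length then false
  else if pvMismatch pattern_pairs permutation_pairs then false
  else pvScan (pvPos permutation) PySem.Set.empty permutation_pairs

-- ===== PRECONDITION & SPEC =====
-- Pre_ excludes inputs on which A raises or leaves Bool: whenever the two pairwise-order patterns coincide,
-- A calls check_vincular_property, which returns None (not a bool) for adjacent ∉ {1,2} and calls
-- permutation.index on pair elements (ValueError when absent from permutation); it thereby also excludes
-- same-pattern inputs with a missing element on which A happens to return before reaching the bad lookup.
def Pre_check_contain_pattern (pattern_pairs : List Int) (permutation_pairs : List Int) (permutation : List Int) (adjacent : Int) : Prop :=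
  ¬ ((pattern_pairs.length ≤ 1 ∧ permutation_pairs.length ≤ 1) ∨
     (pattern_pairs.length = permutation_pairs.length ∧
      ∀ j < pattern_pairs.length, ∀ i < j,
        ((pattern_pairs.getD i 0 < pattern_pairs.getD j 0) ↔
         (permutation_pairs.getD i 0 < permutation_pairs.getD j 0)))) ∨
  ((adjacent = 1 ∨ adjacent = 2) ∧ ∀ x ∈ permutation_pairs, x ∈ permutation)
instance (pattern_pairs : List Int) (permutation_pairs : List Int) (permutation : List Int) (adjacent : Int) : Decidable (Pre_check_contain_pattern pattern_pairs permutation_pairs permutation adjacent) := by unfold Pre_check_contain_pattern; infer_instance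

def pvWitness_check_contain_pattern : List Int × List Int × List Int × Int := ([1, 2], [3, 5], [3, 5], 1)

def Spec_check_contain_pattern (pattern_pairs : List Int) (permutation_pairs : List Int) (permutation : List Int) (adjacent : Int) (out : Bool) : Prop := out = check_contain_pattern_alt pattern_pairs permutation_pairs permutation adjacent
instance (pattern_pairs : List Int) (permutation_pairs : List Int) (permutation : List Int) (adjacent : Int) (out : Bool) : Decidable (Spec_check_contain_pattern pattern_pairs permutation_pairs permutation adjacent out) := by unfold Spec_check_contain_pattern; infer_instance

-- ===== CLAIM (what is proved, stated in full; the proofs are below) =====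
def Claim_equal_check_contain_pattern : Prop := ∀ (pattern_pairs : List Int) (permutation_pairs : List Int) (permutation : List Int) (adjacent : Int), Dom_check_contain_pattern pattern_pairs permutation_pairs permutation adjacent → Pre_check_contain_pattern pattern_pairs permutation_pairs permutation adjacent → Spec_check_contain_pattern pattern_pairs permutation_pairs permutation adjacent (check_contain_pattern pattern_pairs permutation_pairs permutation adjacent)

-- ===== LEMMAS AND PROOFS =====

-- pointwise agreement of the two pairwise-order patterns
def pvPW (p q : List Int) : Prop :=
  ∀ j < p.length, ∀ i < j, ((p.getD i 0 < p.getD j 0) ↔ (q.getD i 0 < q.getD j 0))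

-- the "adjacent hit" predicate on an (earlier, later) pair of values
def pvP (perm : List Int) (x y : Int) : Bool :=
  ((PySem.List.index? perm y).bind (fun a =>
    (PySem.List.index? perm x).map (fun b => decide ((a : Int) - (b : Int) = 1)))).getD false

def pvC : Nat → Nat
  | 0 => 0
  | n + 1 => n + pvC n

lemma pyGetD_pair0 (a b : Int) : PySem.List.pyGetD [a, b] 0 0 = a := rfl
lemma pyGetD_pair1 (a b : Int) : PySem.List.pyGetD [a, b] 1 0 = b := rfl
lemma comb2_nil : PySem.List.combinations ([] : List Int) 2 = [] := rfl

lemma pvBools_eq_map (pairs : List (List Int)) :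
    pvBools pairs = pairs.map
      (fun item => decide (PySem.List.pyGetD item 0 0 < PySem.List.pyGetD item 1 0)) := by
  have h1 : pvBools pairs = pairs.foldl
      (fun acc item => acc ++ [decide (PySem.List.pyGetD item 0 0 < PySem.List.pyGetD item 1 0)]) [] := by
    unfold pvBools
    exact PySem.List.foldl_pyRange_zero_pyGetD' pairs ([] : List Int)
      (fun acc item => acc ++ [decide (PySem.List.pyGetD item 0 0 < PySem.List.pyGetD item 1 0)])
      ([] : List Bool)
  rw [h1, PySem.List.foldl_append_singleton_eq_map]
  rfl

lemma comb2_cons (x : Int) (xs : List Int) :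
    PySem.List.combinations (x :: xs) 2 = xs.map (fun y => [x, y]) ++ PySem.List.combinations xs 2 := by
  simpa [PySem.List.combinations_one, List.map_map, Function.comp] using
    PySem.List.combinations_cons_succ x xs 1

lemma comb2_len (xs : List Int) : (PySem.List.combinations xs 2).length = pvC xs.length := by
  induction xs with
  | nil => rfl
  | cons x xs ih => rw [comb2_cons]; simp [ih, pvC]

lemma pvC_mono : ∀ n m : Nat, m < n → 2 ≤ n → pvC m < pvC n := by
  intro n
  induction n with
  | zero => intro m h _; omega
  | succ k ih =>
    intro m hm h2
    have e : pvC (k + 1) = k + pvC k := rfl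
    rcases Nat.lt_succ_iff_lt_or_eq.mp hm with h | h
    · by_cases hk : 2 ≤ k
      · have := ih m h hk; omega
      · have hk1 : k = 1 := by omega
        have hm0 : m = 0 := by omega
        subst hk1; subst hm0; decide
    · subst h; omega

lemma pvC_inj {m n : Nat} (hEq : pvC m = pvC n) : m = n ∨ (m ≤ 1 ∧ n ≤ 1) := by
  rcases Nat.lt_trichotomy m n with h | h | h
  · by_cases h2 : 2 ≤ n
    · exact absurd hEq (Nat.ne_of_lt (pvC_mono n m h h2))
    · right; omega
  · left; exact h
  · by_cases h2 : 2 ≤ m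
    · exact absurd hEq.symm (Nat.ne_of_lt (pvC_mono m n h h2))
    · right; omega

lemma getD_lt {l : List Int} {n : Nat} (h : n < l.length) (d : Int) : l.getD n d = l[n] := by
  simp [List.getD, List.getElem?_eq_getElem h]

lemma getD_mem' {l : List Int} {n : Nat} (h : n < l.length) : l.getD n 0 ∈ l := by
  rw [getD_lt h]; exact List.getElem_mem h

lemma map_lt_eq_iff (x y : Int) : ∀ (p q : List Int), p.length = q.length →
    (p.map (fun b => decide (x < b)) = q.map (fun b => decide (y < b)) ↔
     ∀ k < p.length, (x < p.getD k 0 ↔ y < q.getD k 0)) := by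
  intro p
  induction p with
  | nil =>
    intro q h
    have : q = [] := by cases q <;> simp_all
    subst this; simp
  | cons a p ih =>
    intro q h
    cases q with
    | nil => simp at h
    | cons b q =>
      have h' : p.length = q.length := by simpa using h
      simp only [List.map_cons, List.cons.injEq]
      rw [ih q h']
      constructor
      · rintro ⟨h1, h2⟩ k hk
        cases k with
        | zero => simpa [decide_eq_decide] using h1
        | succ k' =>
          simpa using h2 k' (by simp only [List.length_cons] at hk; omega)
      · intro H
        refine ⟨?_, fun k hk => ?_⟩
        · have := H 0 (by simp only [List.length_cons]; omega)
          simpa [decide_eq_decide] using this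
        · have := H (k + 1) (by simp only [List.length_cons]; omega)
          simpa using this

lemma pvPW_cons (x y : Int) (p q : List Int) :
    pvPW (x :: p) (y :: q) ↔
      ((∀ k < p.length, (x < p.getD k 0 ↔ y < q.getD k 0)) ∧ pvPW p q) := by
  unfold pvPW
  constructor
  · intro H
    refine ⟨fun k hk => ?_, fun j hj i hij => ?_⟩
    · simpa using H (k + 1) (by simp only [List.length_cons]; omega) 0 (by omega)
    · simpa using H (j + 1) (by simp only [List.length_cons]; omega) (i + 1) (by omega)
  · rintro ⟨H1, H2⟩ j hj i hij
    cases j with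
    | zero => omega
    | succ j' =>
      simp only [List.length_cons] at hj
      cases i with
      | zero => simpa using H1 j' (by omega)
      | succ i' => simpa using H2 j' (by omega) i' (by omega)

lemma eqlen_bools : ∀ (p q : List Int), p.length = q.length →
    (((PySem.List.combinations p 2).map
        (fun item => decide (PySem.List.pyGetD item 0 0 < PySem.List.pyGetD item 1 0)) =
      (PySem.List.combinations q 2).map
        (fun item => decide (PySem.List.pyGetD item 0 0 < PySem.List.pyGetD item 1 0))) ↔ pvPW p q) := by
  intro p
  induction p with
  | nil =>
    intro q h
    have : q = [] := by cases q <;> simp_all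
    subst this
    simp [comb2_nil, pvPW]
  | cons x p ih =>
    intro q h
    cases q with
    | nil => simp at h
    | cons y q =>
      have hl : p.length = q.length := by simpa using h
      rw [comb2_cons, comb2_cons, List.map_append, List.map_append, List.map_map, List.map_map]
      have hcx : ((fun item => decide (PySem.List.pyGetD item 0 0 < PySem.List.pyGetD item 1 0)) ∘
          fun b => [x, b]) = fun b => decide (x < b) := by
        funext b; simp [Function.comp, pyGetD_pair0, pyGetD_pair1]
      have hcy : ((fun item => decide (PySem.List.pyGetD item 0 0 < PySem.List.pyGetD item 1 0)) ∘
          fun b => [y, b]) = fun b => decide (y < b) := by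
        funext b; simp [Function.comp, pyGetD_pair0, pyGetD_pair1]
      rw [hcx, hcy, pvPW_cons]
      constructor
      · intro hEq
        have hlenmap : (p.map fun b => decide (x < b)).length = (q.map fun b => decide (y < b)).length := by
          simp [hl]
        obtain ⟨h1, h2⟩ := List.append_inj hEq hlenmap
        exact ⟨(map_lt_eq_iff x y p q hl).mp h1, (ih q hl).mp h2⟩
      · rintro ⟨H1, H2⟩
        rw [(map_lt_eq_iff x y p q hl).mpr H1, (ih q hl).mpr H2]

lemma bools_eq_iff (p q : List Int) :
    (pvBools (PySem.List.combinations q 2) = pvBools (PySem.List.combinations p 2)) ↔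
      ((p.length ≤ 1 ∧ q.length ≤ 1) ∨ (p.length = q.length ∧ pvPW p q)) := by
  rw [pvBools_eq_map, pvBools_eq_map]
  constructor
  · intro hEq
    have hlen : pvC q.length = pvC p.length := by
      have := congrArg List.length hEq
      simpa [comb2_len] using this
    rcases pvC_inj hlen with hqp | hle
    · right
      exact ⟨hqp.symm, (eqlen_bools p q hqp.symm).mp hEq.symm⟩
    · left; exact ⟨hle.2, hle.1⟩
  · rintro (⟨h1, h2⟩ | ⟨hlen, hpw⟩)
    · have e1 : PySem.List.combinations p 2 = [] := by
        apply PySem.List.combinations_eq_nil_of_length_lt; omega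
      have e2 : PySem.List.combinations q 2 = [] := by
        apply PySem.List.combinations_eq_nil_of_length_lt; omega
      rw [e1, e2]
    · exact ((eqlen_bools p q hlen).mpr hpw).symm

lemma mem_comb2 : ∀ (q : List Int) (item : List Int),
    (item ∈ PySem.List.combinations q 2 ↔
      ∃ j < q.length, ∃ i < j, item = [q.getD i 0, q.getD j 0]) := by
  intro q
  induction q with
  | nil =>
    intro item
    simp only [comb2_nil, List.not_mem_nil, false_iff]
    rintro ⟨j, hj, _⟩
    simp at hj
  | cons x q ih =>
    intro item
    rw [comb2_cons]
    simp only [List.mem_append, List.mem_map, ih]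
    constructor
    · rintro (⟨y, hy, rfl⟩ | ⟨j, hj, i, hij, rfl⟩)
      · obtain ⟨k, hk, hky⟩ := List.mem_iff_getElem.mp hy
        refine ⟨k + 1, by simp only [List.length_cons]; omega, 0, by omega, ?_⟩
        simp only [List.getD_cons_zero, List.getD_cons_succ]
        rw [getD_lt hk, hky]
      · exact ⟨j + 1, by simp only [List.length_cons]; omega, i + 1, by omega,
          by simp [List.getD_cons_succ]⟩
    · rintro ⟨j, hj, i, hij, rfl⟩
      simp only [List.length_cons] at hj
      cases j with
      | zero => omega
      | succ j' =>
        cases i with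
        | zero =>
          left
          refine ⟨q.getD j' 0, getD_mem' (by omega), ?_⟩
          simp [List.getD_cons_zero, List.getD_cons_succ]
        | succ i' =>
          right
          exact ⟨j', by omega, i', by omega, by simp [List.getD_cons_succ]⟩

lemma loop1_any (perm : List Int) : ∀ (l : List (List Int)),
    (∀ item ∈ l, (PySem.List.index? perm (PySem.List.pyGetD item 1 0)).isSome ∧
                 (PySem.List.index? perm (PySem.List.pyGetD item 0 0)).isSome) →
    pvVincLoop1 perm l =
      l.any (fun item => pvP perm (PySem.List.pyGetD item 0 0) (PySem.List.pyGetD item 1 0)) := by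
  intro l
  induction l with
  | nil => intro _; simp [pvVincLoop1]
  | cons item rest ih =>
    intro h
    obtain ⟨hs1, hs2⟩ := h item (by simp)
    obtain ⟨a, ha⟩ := Option.isSome_iff_exists.mp hs1
    obtain ⟨b, hb⟩ := Option.isSome_iff_exists.mp hs2
    have ih' := ih (fun it hit => h it (List.mem_cons_of_mem _ hit))
    have hpvp : pvP perm (PySem.List.pyGetD item 0 0) (PySem.List.pyGetD item 1 0)
        = decide ((a : Int) - (b : Int) = 1) := by
      unfold pvP; rw [ha, hb]; rfl
    simp only [pvVincLoop1, ha, hb, List.any_cons, hpvp, ih']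
    by_cases hab : (a : Int) - (b : Int) = 1
    · simp [hab]
    · simp [hab]

lemma loop2_eq_loop1 (perm : List Int) : ∀ (l : List (List Int)),
    (∀ item ∈ l, item.length = 2) → pvVincLoop2 perm l = pvVincLoop1 perm l := by
  intro l
  induction l with
  | nil => intro _; rfl
  | cons item rest ih =>
    intro h
    have h2 : item.length = 2 := h item (by simp)
    have e1 : ((item.length : Int) - 1) = 1 := by rw [h2]; norm_num
    have e2 : ((item.length : Int) - 2) = 0 := by rw [h2]; norm_num
    have ih' := ih (fun it hit => h it (List.mem_cons_of_mem _ hit))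
    simp only [pvVincLoop2, pvVincLoop1, e1, e2, ih']

lemma mism_true_iff (p q : List Int) : pvMismatch p q = true ↔
    ∃ i, i < p.length ∧ ∃ j, i < j ∧ j < p.length ∧
      ¬(p.getD i 0 < p.getD j 0 ↔ q.getD i 0 < q.getD j 0) := by
  unfold pvMismatch
  simp only [List.any_eq_true, List.mem_range, List.mem_range'_1, bne_iff_ne, ne_eq,
    decide_eq_decide]
  constructor
  · rintro ⟨i, hi, j, ⟨hj1, hj2⟩, hne⟩
    exact ⟨i, hi, j, by omega, by omega, hne⟩
  · rintro ⟨i, hi, j, hij, hj, hne⟩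
    exact ⟨i, hi, j, ⟨by omega, by omega⟩, hne⟩

lemma pos_get (perm : List Int) : ∀ (s : Int) (d : PySem.Dict Int Int) (y : Int),
    ((PySem.List.enumerate perm s).foldl (fun d iv => d.setdefault iv.2 iv.1) d).get? y
      = (match d.get? y with
         | some v => some v
         | none => (PySem.List.index? perm y).map (fun k => s + (k : Int))) := by
  induction perm with
  | nil =>
    intro s d y
    simp only [PySem.List.enumerate_nil, List.foldl_nil]
    cases hd : d.get? y <;> simp [PySem.List.index?_eq_idxOf?]
  | cons x rest ih =>
    intro s d y
    simp only [PySem.List.enumerate_cons, List.foldl_cons]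
    rw [ih (s + 1) (d.setdefault x s) y]
    by_cases hxy : y = x
    · subst hxy
      rw [PySem.Dict.get?_setdefault_self]
      cases hd : d.get? y
      · simp only [hd, Option.getD_none]
        rw [PySem.List.index?_cons_self]
        simp
      · simp [hd]
    · have hsd : (d.setdefault x s).get? y = d.get? y := by
        apply PySem.Dict.get?_setdefault_of_ne
        exact hxy
      rw [hsd]
      cases hd : d.get? y
      · simp only []
        have hic : PySem.List.index? (x :: rest) y = (PySem.List.index? rest y).map (· + 1) := by
          apply PySem.List.index?_cons_of_ne
          first
          | exact fun e => hxy (Eq.symm e)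
          | exact hxy
        rw [hic]
        cases hi : PySem.List.index? rest y
        · rfl
        · simp
          omega
      · rfl

lemma pvPos_get (perm : List Int) (y : Int) :
    (pvPos perm).get? y = (PySem.List.index? perm y).map (fun k => (k : Int)) := by
  unfold pvPos
  rw [pos_get perm 0 PySem.Dict.empty y]
  rw [PySem.Dict.get?_empty]
  cases hi : PySem.List.index? perm y <;> simp [hi]

lemma contains_empty_int (z : Int) : PySem.Set.contains PySem.Set.empty z = false := by
  simp [PySem.Set.contains, PySem.Set.empty]

lemma scan_iff (perm : List Int) : ∀ (q : List Int) (seen : PySem.Set Int),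
    (∀ y ∈ q, y ∈ perm) →
    (pvScan (pvPos perm) seen q = true ↔
      ∃ j < q.length, ∃ a : Nat, PySem.List.index? perm (q.getD j 0) = some a ∧
        (PySem.Set.contains seen ((a : Int) - 1) = true ∨
         ∃ i < j, ∃ b : Nat, PySem.List.index? perm (q.getD i 0) = some b ∧
           (a : Int) - 1 = (b : Int))) := by
  intro q
  induction q with
  | nil =>
    intro seen _
    simp only [pvScan, List.length_nil]
    constructor
    · intro h; simp at h
    · rintro ⟨j, hj, _⟩; omega
  | cons y rest ih =>
    intro seen h
    have hy : y ∈ perm := h y (by simp)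
    obtain ⟨a, ha⟩ := Option.isSome_iff_exists.mp ((PySem.List.index?_isSome_iff perm y).mpr hy)
    have hpos : (pvPos perm).getD y 0 = (a : Int) := by
      rw [PySem.Dict.getD_eq_get?_getD, pvPos_get, ha]; rfl
    simp only [pvScan, hpos]
    by_cases hc : PySem.Set.contains seen ((a : Int) - 1) = true
    · rw [if_pos hc]
      constructor
      · intro _
        exact ⟨0, by simp, a, by simpa using ha, Or.inl hc⟩
      · intro _; rfl
    · rw [if_neg hc]
      rw [ih (PySem.Set.add seen (a : Int)) (fun z hz => h z (List.mem_cons_of_mem _ hz))]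
      have hadd : ∀ z : Int, PySem.Set.contains (PySem.Set.add seen (a : Int)) z = true ↔
          (PySem.Set.contains seen z = true ∨ z = (a : Int)) := by
        intro z
        rw [PySem.Set.contains_iff, PySem.Set.contains_iff, PySem.Set.mem_add]
      constructor
      · rintro ⟨j, hj, a', ha', hcase⟩
        refine ⟨j + 1, by simp only [List.length_cons]; omega, a', by simpa using ha', ?_⟩
        rcases hcase with hct | ⟨i, hij, b, hb, heq⟩
        · rcases (hadd _).mp hct with hct' | heqa
          · exact Or.inl hct'
          · exact Or.inr ⟨0, by omega, a, by simpa using ha, heqa⟩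
        · exact Or.inr ⟨i + 1, by omega, b, by simpa using hb, heq⟩
      · rintro ⟨j, hj, a', ha', hcase⟩
        simp only [List.length_cons] at hj
        cases j with
        | zero =>
          have haa : a' = a := by
            simp only [List.getD_cons_zero] at ha'
            exact Option.some.inj (ha'.symm.trans ha)
          rcases hcase with hct | ⟨i, hi0, _⟩
          · subst haa; exact absurd hct hc
          · omega
        | succ j' =>
          refine ⟨j', by omega, a', by simpa using ha', ?_⟩
          rcases hcase with hct | ⟨i, hij, b, hb, heq⟩
          · exact Or.inl ((hadd _).mpr (Or.inl hct))
          · cases i with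
            | zero =>
              have hba : b = a := by
                simp only [List.getD_cons_zero] at hb
                exact Option.some.inj (hb.symm.trans ha)
              exact Or.inl ((hadd _).mpr (Or.inr (by rw [heq, hba])))
            | succ i' =>
              exact Or.inr ⟨i', by omega, b, by simpa using hb, heq⟩

lemma vinc_true_iff (q perm : List Int) (adj : Int) (hadj : adj = 1 ∨ adj = 2)
    (hmem : ∀ x ∈ q, x ∈ perm) :
    (check_vincular_property (PySem.List.combinations q 2) perm adj = true ↔
      ∃ j < q.length, ∃ i < j, pvP perm (q.getD i 0) (q.getD j 0) = true) := by
  have hshape : ∀ item ∈ PySem.List.combinations q 2,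
      ∃ j < q.length, ∃ i < j, item = [q.getD i 0, q.getD j 0] :=
    fun item h => (mem_comb2 q item).mp h
  have hlen2 : ∀ item ∈ PySem.List.combinations q 2, item.length = 2 := by
    intro item h
    obtain ⟨j, hj, i, hij, rfl⟩ := hshape item h
    rfl
  have hsome : ∀ item ∈ PySem.List.combinations q 2,
      (PySem.List.index? perm (PySem.List.pyGetD item 1 0)).isSome ∧
      (PySem.List.index? perm (PySem.List.pyGetD item 0 0)).isSome := by
    intro item h
    obtain ⟨j, hj, i, hij, rfl⟩ := hshape item h
    rw [pyGetD_pair0, pyGetD_pair1]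
    constructor <;> rw [PySem.List.index?_isSome_iff]
    · exact hmem _ (getD_mem' hj)
    · exact hmem _ (getD_mem' (by omega))
  have key : pvVincLoop1 perm (PySem.List.combinations q 2) = true ↔
      ∃ j < q.length, ∃ i < j, pvP perm (q.getD i 0) (q.getD j 0) = true := by
    rw [loop1_any perm _ hsome, List.any_eq_true]
    constructor
    · rintro ⟨item, hitem, hP⟩
      obtain ⟨j, hj, i, hij, rfl⟩ := hshape item hitem
      exact ⟨j, hj, i, hij, by simpa [pyGetD_pair0, pyGetD_pair1] using hP⟩
    · rintro ⟨j, hj, i, hij, hP⟩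
      exact ⟨[q.getD i 0, q.getD j 0], (mem_comb2 q _).mpr ⟨j, hj, i, hij, rfl⟩,
        by simpa [pyGetD_pair0, pyGetD_pair1] using hP⟩
  rcases hadj with rfl | rfl
  · unfold check_vincular_property
    rw [if_pos rfl]
    exact key
  · unfold check_vincular_property
    rw [if_neg (by norm_num), if_pos rfl]
    rw [loop2_eq_loop1 perm _ hlen2]
    exact key

lemma alt_scan_iff (q perm : List Int) (hmem : ∀ x ∈ q, x ∈ perm) :
    (pvScan (pvPos perm) PySem.Set.empty q = true ↔
      ∃ j < q.length, ∃ i < j, pvP perm (q.getD i 0) (q.getD j 0) = true) := by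
  rw [scan_iff perm q _ hmem]
  constructor
  · rintro ⟨j, hj, a, ha, hcase⟩
    rcases hcase with hfalse | ⟨i, hij, b, hb, heq⟩
    · rw [contains_empty_int] at hfalse; exact absurd hfalse (by simp)
    · refine ⟨j, hj, i, hij, ?_⟩
      unfold pvP
      rw [ha, hb]
      simp
      omega
  · rintro ⟨j, hj, i, hij, hP⟩
    cases hA : PySem.List.index? perm (q.getD j 0) with
    | none => unfold pvP at hP; rw [hA] at hP; simp at hP
    | some a =>
      cases hB : PySem.List.index? perm (q.getD i 0) with
      | none => unfold pvP at hP; rw [hA, hB] at hP; simp at hP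
      | some b =>
        have hab : (a : Int) - (b : Int) = 1 := by
          unfold pvP at hP; rw [hA, hB] at hP; simpa using hP
        exact ⟨j, hj, a, hA, Or.inr ⟨i, hij, b, hB, by omega⟩⟩

-- ===== VERDICT (by name: the statement is the Claim_ definition above) =====
theorem check_contain_pattern_spec : Claim_equal_check_contain_pattern := by
  intro p q perm adj _hdom hpre
  unfold Spec_check_contain_pattern
  by_cases hAG : ((p.length ≤ 1 ∧ q.length ≤ 1) ∨ (p.length = q.length ∧ pvPW p q))
  · have hpre2 : (adj = 1 ∨ adj = 2) ∧ ∀ x ∈ q, x ∈ perm := by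
      rcases hpre with hne | h2
      · exact absurd (by simpa [pvPW] using hAG) hne
      · exact h2
    obtain ⟨hadj, hmem⟩ := hpre2
    have hbe : pvBools (PySem.List.combinations q 2) = pvBools (PySem.List.combinations p 2) :=
      (bools_eq_iff p q).mpr hAG
    show check_contain_pattern p q perm adj = check_contain_pattern_alt p q perm adj
    unfold check_contain_pattern check_contain_pattern_alt
    dsimp only
    rw [if_pos hbe]
    by_cases hql : q.length = p.length
    · rw [if_neg (by omega)]
      have hpw : pvPW p q := by
        rcases hAG with ⟨h1, h2⟩ | ⟨_, hpw⟩
        · intro j hj i hij; omega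
        · exact hpw
      have hmf : pvMismatch p q = false := by
        cases hmt : pvMismatch p q
        · rfl
        · exfalso
          obtain ⟨i, hi, j, hij, hj, hne⟩ := (mism_true_iff p q).mp hmt
          exact hne (hpw j hj i hij)
      rw [hmf]
      simp only [Bool.false_eq_true, if_false]
      exact Bool.eq_iff_iff.mpr ((vinc_true_iff q perm adj hadj hmem).trans
        (alt_scan_iff q perm hmem).symm)
    · have hle : p.length ≤ 1 ∧ q.length ≤ 1 := by
        rcases hAG with hle | ⟨he, _⟩
        · exact hle
        · exact absurd he (by omega)
      rw [if_pos (by omega)]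
      have hcq : PySem.List.combinations q 2 = [] := by
        apply PySem.List.combinations_eq_nil_of_length_lt; omega
      rw [hcq]
      unfold check_vincular_property
      split_ifs <;> simp [pvVincLoop1, pvVincLoop2]
  · show check_contain_pattern p q perm adj = check_contain_pattern_alt p q perm adj
    unfold check_contain_pattern check_contain_pattern_alt
    dsimp only
    rw [if_neg (fun hbe => hAG ((bools_eq_iff p q).mp hbe))]
    by_cases hql : q.length = p.length
    · rw [if_neg (by omega)]
      have hnpw : ¬ pvPW p q := fun hpw => hAG (Or.inr ⟨hql.symm, hpw⟩)
      have hmt : pvMismatch p q = true := by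
        rw [mism_true_iff]
        unfold pvPW at hnpw
        push_neg at hnpw
        obtain ⟨j, hj, i, hij, hne⟩ := hnpw
        refine ⟨i, by omega, j, hij, hj, ?_⟩
        intro hiff
        rcases hne with ⟨h1, h2⟩ | ⟨h1, h2⟩
        · exact absurd (hiff.mp h1) (by omega)
        · exact absurd (hiff.mpr h2) (by omega)
      rw [hmt]
      simp
    · rw [if_pos (by omega)]
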